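-- pv_equiv track=rewrite | github.com/z-ephyrus/Orion | Demo/Preprocessing/domain_detection.py | domain_detection
-- ===== SOURCE A (Python) =====
-- CODE_LEX = {
--     'code', 'program', 'function', 'class', 'method', 'variable',
--     'loop', 'debug', 'compile', 'execute', 'script', 'commit',
--     'repository', 'syntax', 'algorithm', 'develop', 'engineer',
--     'deploy', 'branch', 'merge', 'git', 'python', 'java', 'ruby','c',
--     'cpp','optimize'
-- }
--
-- RESEARCH_LEX = {
--     'study', 'paper', 'article', 'hypothesis', 'data', 'analyze',
--     'experiment', 'journal', 'methodology', 'result', 'finding',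
--     'abstract', 'literature', 'theory', 'publish', 'citation',
--     'survey', 'statistic', 'model', 'sample', 'validity', 'source'
-- }
--
-- def domain_detection(tokens):
--     DOMAIN_LEX={
--         'CODE' :CODE_LEX,
--         'RESERCH':RESEARCH_LEX
--     }
--     domain_scores = {domain:0 for domain in DOMAIN_LEX}
--     token_set = set(tokens)
--     for domain, lexicon in DOMAIN_LEX.items():
--         matches = token_set.intersection(lexicon)
--         domain_scores[domain] = len(matches)
--     best_domain = max(domain_scores, key=domain_scores.get)
--     max_score = domain_scores[best_domain]
--
--
--     THRESHOLD = 2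
--
--     if max_score >= THRESHOLD:
--         return best_domain
--     else:
--         return 'UNKNOWN'
-- ===== SOURCE B (Python) =====
-- CODE_LEX = {
--     'code', 'program', 'function', 'class', 'method', 'variable',
--     'loop', 'debug', 'compile', 'execute', 'script', 'commit',
--     'repository', 'syntax', 'algorithm', 'develop', 'engineer',
--     'deploy', 'branch', 'merge', 'git', 'python', 'java', 'ruby', 'c',
--     'cpp', 'optimize'
-- }
--
-- RESEARCH_LEX = {
--     'study', 'paper', 'article', 'hypothesis', 'data', 'analyze',
--     'experiment', 'journal', 'methodology', 'result', 'finding',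
--     'abstract', 'literature', 'theory', 'publish', 'citation',
--     'survey', 'statistic', 'model', 'sample', 'validity', 'source'
-- }
--
--
-- def _overlap(toks, lx):
--     """Count common elements of two strictly sorted lists by a two-pointer merge."""
--     i = j = n = 0
--     while i < len(toks) and j < len(lx):
--         if toks[i] == lx[j]:
--             n += 1
--             i += 1
--             j += 1
--         elif toks[i] < lx[j]:
--             i += 1
--         else:
--             j += 1
--     return n
--
--
-- def domain_detection(tokens):
--     toks = sorted(set(tokens))
--     c = _overlap(toks, sorted(CODE_LEX))
--     r = _overlap(toks, sorted(RESEARCH_LEX))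
--     if c >= r:
--         return 'CODE' if c >= 2 else 'UNKNOWN'
--     return 'RESERCH' if r >= 2 else 'UNKNOWN'
-- ===== Notes on version B (the rewrite author's own statement) =====
-- stated objective: alternative
-- what changed: B replaces A's hash-set intersections, score dict and max-with-key by sorting the distinct tokens and each lexicon and counting overlaps with a two-pointer merge scan, then comparing the two counters directly (CODE wins ties, as A's max does).
import Mathlib
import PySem

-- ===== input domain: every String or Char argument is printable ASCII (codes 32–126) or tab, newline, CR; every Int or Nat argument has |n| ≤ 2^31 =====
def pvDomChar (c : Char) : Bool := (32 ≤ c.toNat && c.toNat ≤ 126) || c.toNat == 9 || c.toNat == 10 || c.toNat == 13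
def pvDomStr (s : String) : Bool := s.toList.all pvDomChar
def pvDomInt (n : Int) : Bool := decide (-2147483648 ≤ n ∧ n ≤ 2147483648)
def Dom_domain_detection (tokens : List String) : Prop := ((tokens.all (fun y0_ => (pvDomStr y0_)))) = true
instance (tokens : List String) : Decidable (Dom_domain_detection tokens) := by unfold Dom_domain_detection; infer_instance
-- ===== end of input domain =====

-- B replaces A's hash-set intersections, score dict and max-with-key by sorting the
-- distinct tokens and lexicons and counting overlaps with a two-pointer merge scan
-- (objective: alternative); same result.

-- module-level lexicons shared by both programs
def pvCodeLex : PySem.Set String := PySem.Set.ofList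
  ["code", "program", "function", "class", "method", "variable",
   "loop", "debug", "compile", "execute", "script", "commit",
   "repository", "syntax", "algorithm", "develop", "engineer",
   "deploy", "branch", "merge", "git", "python", "java", "ruby", "c",
   "cpp", "optimize"]

def pvResearchLex : PySem.Set String := PySem.Set.ofList
  ["study", "paper", "article", "hypothesis", "data", "analyze",
   "experiment", "journal", "methodology", "result", "finding",
   "abstract", "literature", "theory", "publish", "citation",
   "survey", "statistic", "model", "sample", "validity", "source"]

-- ===== PORT A =====
def domain_detection (tokens : List String) : String :=
  let domainLex : List (String × PySem.Set String) :=
    [("CODE", pvCodeLex), ("RESERCH", pvResearchLex)]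
  -- domain_scores = {domain: 0 for domain in DOMAIN_LEX}
  let scores0 : PySem.Dict String Int :=
    domainLex.foldl (fun d p => PySem.Dict.insert d p.1 0) (⟨[]⟩ : PySem.Dict String Int)
  let tokenSet := PySem.Set.ofList tokens
  -- for domain, lexicon in DOMAIN_LEX.items(): domain_scores[domain] = len(token_set & lexicon)
  let scores : PySem.Dict String Int :=
    domainLex.foldl
      (fun d p => PySem.Dict.insert d p.1 ((PySem.Set.inter tokenSet p.2).length : Int)) scores0
  -- best_domain = max(domain_scores, key=domain_scores.get)  (first maximal key)
  match PySem.List.max? (PySem.Dict.keys scores) (fun k => PySem.Dict.getD scores k 0) with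
  | none => ""   -- unreachable: the dict always has two keys
  | some best =>
    let maxScore := PySem.Dict.getD scores best 0
    if maxScore ≥ 2 then best else "UNKNOWN"

-- ===== PORT B =====
-- two-pointer merge count over two strictly sorted lists (Source B's _overlap)
def pvOverlap : List String → List String → Int
  | [], _ => 0
  | _ :: _, [] => 0
  | a :: as_, b :: bs =>
    if a = b then pvOverlap as_ bs + 1
    else if a < b then pvOverlap as_ (b :: bs)
    else pvOverlap (a :: as_) bs
termination_by xs ys => xs.length + ys.length

def domain_detection_alt (tokens : List String) : String :=
  let toks := PySem.List.sorted (PySem.Set.ofList tokens) (fun x => x) false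
  let c := pvOverlap toks (PySem.List.sorted pvCodeLex (fun x => x) false)
  let r := pvOverlap toks (PySem.List.sorted pvResearchLex (fun x => x) false)
  if c ≥ r then (if c ≥ 2 then "CODE" else "UNKNOWN")
  else (if r ≥ 2 then "RESERCH" else "UNKNOWN")

-- ===== PRECONDITION & SPEC =====
def Spec_domain_detection (tokens : List String) (out : String) : Prop := out = domain_detection_alt tokens
instance (tokens : List String) (out : String) : Decidable (Spec_domain_detection tokens out) := by unfold Spec_domain_detection; infer_instance

-- ===== CLAIM =====
def Claim_equal_domain_detection : Prop := ∀ (tokens : List String), Dom_domain_detection tokens → Spec_domain_detection tokens (domain_detection tokens)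

-- ===== LEMMAS AND PROOFS =====

-- the merge scan of two strictly increasing lists counts the elements of the first in the second
theorem pvOverlap_eq_countP (xs ys : List String)
    (hx : xs.Pairwise (· < ·)) (hy : ys.Pairwise (· < ·)) :
    pvOverlap xs ys = (xs.countP (fun t => ys.contains t) : Int) := by
  match xs, ys with
  | [], ys => simp [pvOverlap]
  | a :: as_, [] => simp [pvOverlap]
  | a :: as_, b :: bs =>
    rcases List.pairwise_cons.mp hx with ⟨ha, hx'⟩
    rcases List.pairwise_cons.mp hy with ⟨hb, hy'⟩
    by_cases hab : a = b
    · subst hab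
      rw [pvOverlap, if_pos rfl]
      rw [pvOverlap_eq_countP as_ bs hx' hy']
      rw [List.countP_cons]
      have h2 : List.countP (fun t => decide (t = a) || decide (t ∈ bs)) as_
          = List.countP (fun t => decide (t ∈ bs)) as_ := by
        apply List.countP_congr
        intro x hx2
        have hax : a < x := ha x hx2
        have hne : (decide (x = a)) = false := by simp [ne_of_gt hax]
        simp [hne]
      simp only [List.contains_eq_mem] at *
      simp [h2]
    · rw [pvOverlap, if_neg hab]
      rcases lt_or_gt_of_ne hab with hlt | hgt
      · rw [if_pos hlt]
        rw [pvOverlap_eq_countP as_ (b :: bs) hx' hy]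
        rw [List.countP_cons]
        have hna : a ∉ bs := fun hmem => lt_asymm hlt (hb a hmem)
        simp [hab, hna]
      · rw [if_neg (lt_asymm hgt)]
        rw [pvOverlap_eq_countP (a :: as_) bs hx hy']
        apply congrArg
        rw [List.countP_cons, List.countP_cons]
        have hca : ((b :: bs).contains a) = (bs.contains a) := by
          simp only [List.contains_cons]
          have : (a == b) = false := by simpa using hab
          simp [this]
        have hcs : as_.countP (fun t => (b :: bs).contains t)
            = as_.countP (fun t => bs.contains t) := by
          apply List.countP_congr
          intro x hx2
          have hbx : b < x := lt_trans hgt (ha x hx2)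
          simp only [List.contains_cons, Bool.or_eq_true, beq_iff_eq]
          constructor
          · rintro (h | h)
            · exact absurd h.symm (ne_of_lt hbx)
            · exact h
          · exact Or.inr
        rw [hca, hcs]
termination_by xs.length + ys.length

-- |set(tokens) & lex| = number of distinct tokens belonging to lex
theorem pv_inter_length (s : PySem.Set String) (lex : PySem.Set String) :
    ((PySem.Set.inter s lex).length : Int) = (s.countP (fun t => PySem.Set.contains lex t) : Int) := by
  have h : (PySem.Set.inter s lex).length = s.countP (fun t => PySem.Set.contains lex t) := by
    simp only [PySem.Set.inter, List.countP_eq_length_filter]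
  exact_mod_cast h

-- B's overlap of sorted(set(tokens)) with sorted(lex) equals A's intersection size
theorem pv_overlap_eq_inter (tokens : List String) (lex : List String) :
    pvOverlap (PySem.List.sorted (PySem.Set.ofList tokens) (fun x => x) false)
              (PySem.List.sorted (PySem.Set.ofList lex) (fun x => x) false)
    = ((PySem.Set.inter (PySem.Set.ofList tokens) (PySem.Set.ofList lex)).length : Int) := by
  rw [pvOverlap_eq_countP _ _ (PySem.List.sorted_ofList_pairwise_lt tokens)
        (PySem.List.sorted_ofList_pairwise_lt lex)]
  rw [pv_inter_length]
  apply congrArg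
  rw [(PySem.List.sorted_perm (PySem.Set.ofList tokens) (fun x => x) false).countP_eq]
  apply List.countP_congr
  intro x _
  simp [PySem.List.mem_sorted]

-- ===== VERDICT =====
set_option maxHeartbeats 2000000 in
theorem domain_detection_spec : Claim_equal_domain_detection := by
  intro tokens _
  unfold Spec_domain_detection domain_detection domain_detection_alt pvCodeLex pvResearchLex
  simp only [pv_overlap_eq_inter]
  simp [PySem.Dict.insert, PySem.Dict.contains, PySem.Dict.keys, PySem.Dict.getD,
    PySem.Dict.get?, PySem.List.max?]
  generalize hc : List.length ((PySem.Set.ofList tokens).inter (PySem.Set.ofList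
    ["code", "program", "function", "class", "method", "variable",
     "loop", "debug", "compile", "execute", "script", "commit",
     "repository", "syntax", "algorithm", "develop", "engineer",
     "deploy", "branch", "merge", "git", "python", "java", "ruby", "c",
     "cpp", "optimize"])) = cn
  generalize hr : List.length ((PySem.Set.ofList tokens).inter (PySem.Set.ofList
    ["study", "paper", "article", "hypothesis", "data", "analyze",
     "experiment", "journal", "methodology", "result", "finding",
     "abstract", "literature", "theory", "publish", "citation",
     "survey", "statistic", "model", "sample", "validity", "source"])) = rn
  rcases Nat.lt_or_ge cn rn with h | h
  · have h' : ¬ rn ≤ cn := Nat.not_le.mpr h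
    simp only [if_pos h, if_neg h']
    simp [List.find?]
  · have h' : ¬ cn < rn := Nat.not_lt.mpr h
    simp only [if_neg h', if_pos h]
    simp [List.find?]
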